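-- pv_equiv track=rewrite | github.com/Arsen1302/Code-copy-detector | TestData/solutions/problem_1138_4.py | solution_1138_4
-- ===== SOURCE A (Python) =====
-- def solution_1138_4(nums):
--     lSum, rSum, l, r = 0, sum(nums), 0, len(nums) - 1
--     ans = []
--     for n in nums:
--         rSum -= n
--         ans.append((n * l) - lSum + rSum - (n * r))
--         lSum += n
--         l += 1
--         r -= 1
--     return ans
-- ===== SOURCE B (Python) =====
-- def solution_1138_4(nums):
--     n = len(nums)
--     total = sum(nums)
--     prefix = [0]
--     for x in nums:
--         prefix.append(prefix[-1] + x)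
--     return [nums[i] * (2 * i - n) + total - 2 * prefix[i] for i in range(n)]
-- ===== Notes on version B (the rewrite author's own statement) =====
-- stated objective: simpler
-- what changed: Replaces A's single loop threading four mutable accumulators (lSum, rSum, l, r) with a precomputed prefix-sum table plus a direct index-based comprehension using the closed form nums[i]*(2*i-n) + total - 2*prefix[i].
import Mathlib
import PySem

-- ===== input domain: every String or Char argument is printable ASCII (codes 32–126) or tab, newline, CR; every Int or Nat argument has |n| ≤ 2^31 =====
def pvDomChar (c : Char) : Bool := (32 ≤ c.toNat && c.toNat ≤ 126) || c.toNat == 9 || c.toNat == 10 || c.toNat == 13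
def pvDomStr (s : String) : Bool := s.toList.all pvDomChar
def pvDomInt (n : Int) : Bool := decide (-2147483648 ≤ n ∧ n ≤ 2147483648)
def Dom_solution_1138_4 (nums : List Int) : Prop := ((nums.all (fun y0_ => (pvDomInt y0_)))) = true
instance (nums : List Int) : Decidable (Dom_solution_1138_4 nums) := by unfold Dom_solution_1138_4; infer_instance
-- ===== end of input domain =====

-- B replaces A's four-accumulator loop with a prefix-sum table and a direct indexed map (simpler decomposition).

-- ===== PORT A =====
-- the for-loop of A: state (lSum, rSum, l, r), appending one answer per element
def aLoop : List Int → Int → Int → Int → Int → List Int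
  | [], _, _, _, _ => []
  | n :: rest, lSum, rSum, l, r =>
    let rSum' := rSum - n
    ((n * l) - lSum + rSum' - (n * r)) :: aLoop rest (lSum + n) rSum' (l + 1) (r - 1)

def solution_1138_4 (nums : List Int) : List Int :=
  aLoop nums 0 nums.sum 0 ((nums.length : Int) - 1)

-- ===== PORT B =====
-- B's prefix loop: prefix = [0]; for x in nums: prefix.append(prefix[-1] + x)
def bPrefix (acc : Int) : List Int → List Int
  | [] => [acc]
  | x :: rest => acc :: bPrefix (acc + x) rest

def solution_1138_4_alt (nums : List Int) : List Int :=
  let n : Int := nums.length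
  let total := nums.sum
  let pre := bPrefix 0 nums
  (List.range nums.length).map (fun i =>
    nums.getD i 0 * (2 * (i : Int) - n) + total - 2 * pre.getD i 0)

-- ===== PRECONDITION & SPEC =====
def Spec_solution_1138_4 (nums : List Int) (out : List Int) : Prop := out = solution_1138_4_alt nums
instance (nums : List Int) (out : List Int) : Decidable (Spec_solution_1138_4 nums out) := by unfold Spec_solution_1138_4; infer_instance

-- ===== CLAIM (what is proved, stated in full; the proofs are below) =====
def Claim_equal_solution_1138_4 : Prop := ∀ (nums : List Int), Dom_solution_1138_4 nums → Spec_solution_1138_4 nums (solution_1138_4 nums)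

-- ===== LEMMAS AND PROOFS =====

lemma bPrefix_getD (nums : List Int) (acc : Int) (i : Nat) (hi : i ≤ nums.length) :
    (bPrefix acc nums).getD i 0 = acc + (nums.take i).sum := by
  induction nums generalizing acc i with
  | nil =>
    have h0 : i = 0 := Nat.le_zero.mp (by simpa using hi)
    subst h0; simp [bPrefix]
  | cons x rest ih =>
    cases i with
    | zero => simp [bPrefix]
    | succ j =>
      simp only [bPrefix, List.getD_cons_succ, List.take_succ_cons, List.sum_cons]
      rw [ih _ _ (by simpa using hi)]
      ring

lemma aLoop_eq (rest : List Int) (lSum l : Int) :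
    aLoop rest lSum rest.sum l ((rest.length : Int) - 1) =
      (List.range rest.length).map (fun i =>
        rest.getD i 0 * (2 * ((l : Int) + i) - (l + rest.length)) +
          (lSum + rest.sum) - 2 * (lSum + (rest.take i).sum)) := by
  induction rest generalizing lSum l with
  | nil => simp [aLoop]
  | cons n tail ih =>
    simp only [aLoop, List.sum_cons, List.length_cons]
    have e1 : n + tail.sum - n = tail.sum := by ring
    have e2 : ((tail.length + 1 : Nat) : Int) - 1 - 1 = (tail.length : Int) - 1 := by
      push_cast; ring
    rw [e1, e2, ih (lSum + n) (l + 1), List.range_succ_eq_map]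
    simp only [List.map_cons, List.map_map]
    refine List.cons_eq_cons.mpr ⟨?_, ?_⟩
    · simp only [List.getD_cons_zero, List.take_zero, List.sum_nil]
      push_cast; ring
    · apply List.map_congr_left
      intro i _
      simp only [Function.comp, List.getD_cons_succ, List.take_succ_cons, List.sum_cons]
      push_cast
      ring

-- ===== VERDICT (by name: the statement is the Claim_ definition above) =====
theorem solution_1138_4_spec : Claim_equal_solution_1138_4 := by
  intro nums _
  unfold Spec_solution_1138_4 solution_1138_4 solution_1138_4_alt
  rw [aLoop_eq nums 0 0]
  apply List.map_congr_left
  intro i hi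
  rw [bPrefix_getD nums 0 i (le_of_lt (List.mem_range.mp hi))]
  ring
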